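-- pv_equiv track=rewrite | github.com/odiouschipmunk/vision | squash/Functions.py | findLastTwo
-- ===== SOURCE A (Python) =====
-- def findLastTwo(array):
--     possibleis = []
--     for i in range(len(array)):
--         if array[i][1] == 2:
--             possibleis.append(i)
--     if len(possibleis) > 1:
--         return possibleis[-1]
--     return -1
-- ===== SOURCE B (Python) =====
-- def findLastTwo(array):
--     cand = -1
--     seen = False
--     for i in range(len(array) - 1, -1, -1):
--         if array[i][1] == 2:
--             if seen:
--                 return cand
--             cand = i
--             seen = True
--     return -1
-- ===== Notes on version B (the rewrite author's own statement) =====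
-- stated objective: alternative
-- what changed: Reverse scan with early exit keeping only a seen-flag and a candidate index, instead of building the full list of matching indices in a forward pass.
import Mathlib
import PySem

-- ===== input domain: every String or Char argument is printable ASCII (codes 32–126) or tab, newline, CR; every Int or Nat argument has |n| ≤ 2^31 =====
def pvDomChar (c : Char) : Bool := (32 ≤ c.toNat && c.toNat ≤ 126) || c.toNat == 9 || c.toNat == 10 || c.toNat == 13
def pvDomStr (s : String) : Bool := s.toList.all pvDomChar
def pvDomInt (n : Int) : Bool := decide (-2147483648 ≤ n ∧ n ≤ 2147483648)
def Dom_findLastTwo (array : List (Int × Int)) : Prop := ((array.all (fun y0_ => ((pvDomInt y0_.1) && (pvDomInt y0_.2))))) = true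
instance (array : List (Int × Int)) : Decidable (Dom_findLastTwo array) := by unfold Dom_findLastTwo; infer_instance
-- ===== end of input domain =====

-- B changes the traversal: a reverse scan with early exit holding a seen-flag and
-- a candidate index, instead of A's forward pass collecting every matching index.

-- ===== PORT A =====
-- 'for i in range(len(array)): if array[i][1] == 2: possibleis.append(i)'
-- ported as a fold over enumerate (same indices, same elements, same order).
def findLastTwo (array : List (Int × Int)) : Int :=
  let possibleis : List Int :=
    (PySem.List.enumerate array).foldl
      (fun acc p => if p.2.2 == 2 then acc ++ [p.1] else acc) []
  if possibleis.length > 1 then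
    -- possibleis[-1]; the none branch is unreachable since the list is nonempty here
    match PySem.List.pyGet? possibleis (-1) with
    | some v => v
    | none => -1
  else -1

-- ===== PORT B =====
-- the reverse 'for i in range(len(array)-1, -1, -1)' loop of Source B, with its
-- 'seen' flag and candidate, as structural recursion over the reversed enumeration
def pvAltGo : List (Int × (Int × Int)) → Bool → Int → Int
  | [], _, _ => -1
  | (i, x) :: rest, seen, cand =>
    if x.2 == 2 then
      if seen then cand else pvAltGo rest true i
    else pvAltGo rest seen cand

def findLastTwo_alt (array : List (Int × Int)) : Int :=
  pvAltGo (PySem.List.enumerate array).reverse false (-1)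

-- ===== PRECONDITION & SPEC =====
def Spec_findLastTwo (array : List (Int × Int)) (out : Int) : Prop := out = findLastTwo_alt array
instance (array : List (Int × Int)) (out : Int) : Decidable (Spec_findLastTwo array out) := by unfold Spec_findLastTwo; infer_instance

-- ===== CLAIM (what is proved, stated in full; the proofs are below) =====
def Claim_equal_findLastTwo : Prop := ∀ (array : List (Int × Int)), Dom_findLastTwo array → Spec_findLastTwo array (findLastTwo array)

-- ===== LEMMAS AND PROOFS =====

-- B's loop, characterised by the filtered list it scans: seen = true returns cand
-- at the first match, seen = false returns the head index at the second match.
theorem pvAltGo_true (ys : List (Int × (Int × Int))) (cand : Int) :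
    pvAltGo ys true cand =
      match ys.filter (fun p => p.2.2 == 2) with
      | [] => -1
      | _ :: _ => cand := by
  induction ys with
  | nil => rfl
  | cons y t ih =>
    by_cases h : y.2.2 == 2 <;>
      simp [pvAltGo, h, ih]

theorem pvAltGo_false (ys : List (Int × (Int × Int))) (cand : Int) :
    pvAltGo ys false cand =
      match ys.filter (fun p => p.2.2 == 2) with
      | a :: _ :: _ => a.1
      | _ => -1 := by
  induction ys generalizing cand with
  | nil => rfl
  | cons y t ih =>
    by_cases h : y.2.2 == 2
    · simp only [pvAltGo, h, if_pos, List.filter_cons]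
      rw [pvAltGo_true]
      cases ht : t.filter (fun p => p.2.2 == 2) <;> simp
    · simp [pvAltGo, h, ih]

-- ===== VERDICT (by name: the statement is the Claim_ definition above) =====
theorem findLastTwo_spec : Claim_equal_findLastTwo := by
  intro array _
  unfold Spec_findLastTwo findLastTwo findLastTwo_alt
  rw [pvAltGo_false]
  rw [PySem.List.foldl_append_if]
  set L := (PySem.List.enumerate array).filter (fun p => p.2.2 == 2) with hL
  rw [List.filter_reverse]
  cases hrev : L.reverse with
  | nil =>
    have : L = [] := by simpa using congrArg List.reverse hrev
    simp [this]
  | cons a t =>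
    cases t with
    | nil =>
      have : L = [a] := by simpa using congrArg List.reverse hrev
      simp [this]
    | cons b t' =>
      have hlen : L.length = t'.length + 2 := by
        have := congrArg List.length hrev
        simp at this
        omega
      have hlast : L.getLast? = some a := by
        rw [← List.head?_reverse, hrev]; rfl
      have h1 : ([] ++ L.map Prod.fst).length > 1 := by simp [hlen]
      rw [if_pos h1, PySem.List.pyGet?_neg_one]
      simp [List.getLast?_map, hlast]
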